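-- pv_equiv track=rewrite | github.com/npv2k1/zcode_python | ac/PY01040.py | drm
-- ===== SOURCE A (Python) =====
-- def rotate_char(c, k):
--     return chr((ord(c)-ord('A')+k) % 26+ord('A'))
--
-- def rotate(s):
--     k = 0
--     s = list(s)
--     for i in range(len(s)):
--         k += ord(s[i])-ord('A')
--     for i in range(len(s)):
--         s[i] = rotate_char(s[i], k)
--
--     s = ''.join(s)
--     return s
--
-- def drm(s):
--     left_s = s[:len(s)//2]
--     right_s = s[len(s)//2:]
--     left_s = rotate(left_s)
--     right_s = rotate(right_s)
--     res = ['']*len(left_s)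
--     for i in range(len(left_s)):
--         res[i] = rotate_char(left_s[i], ord(right_s[i])-ord('A'))
--     return ''.join(res)
-- ===== SOURCE B (Python) =====
-- def drm(s):
--     n2 = len(s) // 2
--     K = sum(ord(c) - ord('A') for c in s)
--     return ''.join(
--         chr((ord(s[i]) + ord(s[n2 + i]) - 2 * ord('A') + K) % 26 + ord('A'))
--         for i in range(n2)
--     )
-- ===== Notes on version B (the rewrite author's own statement) =====
-- stated objective: simpler
-- what changed: Both half-rotations and the combine step are additions mod 26, so B fuses them into one formula: a single pass computes the whole-string letter sum K and one loop over the first half emits chr((left char + paired right char - 130 + K) mod 26 + 65), building no intermediate rotated half-strings.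
import Mathlib
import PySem

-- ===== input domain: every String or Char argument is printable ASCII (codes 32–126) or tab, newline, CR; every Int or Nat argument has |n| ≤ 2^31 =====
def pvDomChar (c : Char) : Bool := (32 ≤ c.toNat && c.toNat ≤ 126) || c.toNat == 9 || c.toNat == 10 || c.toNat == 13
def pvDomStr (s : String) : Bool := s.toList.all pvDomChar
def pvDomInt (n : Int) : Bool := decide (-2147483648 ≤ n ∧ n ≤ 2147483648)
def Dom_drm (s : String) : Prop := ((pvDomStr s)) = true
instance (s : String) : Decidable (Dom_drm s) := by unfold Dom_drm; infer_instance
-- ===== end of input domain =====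

-- B fuses the two half-rotations and the combine step into one pass adding the
-- whole-string letter sum to each paired (left,right) character mod 26 (objective: simpler).

-- ===== PORT A =====
def rotateChar (c : Char) (k : Int) : Char :=
  Char.ofNat ((PySem.Int.mod ((c.toNat : Int) - 65 + k) 26 + 65).toNat)

def rotateA (cs : List Char) : List Char :=
  let k := cs.foldl (fun k c => k + ((c.toNat : Int) - 65)) 0
  cs.map (fun c => rotateChar c k)

def combineA : List Char → List Char → List Char
  | l :: ls, r :: rs => rotateChar l ((r.toNat : Int) - 65) :: combineA ls rs
  | _, _ => []

def drm (s : String) : String :=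
  let cs := s.toList
  let left := rotateA (cs.take (cs.length / 2))
  let right := rotateA (cs.drop (cs.length / 2))
  String.ofList (combineA left right)

-- ===== PORT B =====
def drm_alt (s : String) : String :=
  let cs := s.toList
  let n2 := cs.length / 2
  let K := (cs.map (fun c => (c.toNat : Int) - 65)).sum
  String.ofList ((List.range n2).map (fun i =>
    Char.ofNat ((PySem.Int.mod (((cs.getD i 'A').toNat : Int) +
      ((cs.getD (n2 + i) 'A').toNat : Int) - 130 + K) 26 + 65).toNat)))

-- ===== PRECONDITION & SPEC =====
def Spec_drm (s : String) (out : String) : Prop := out = drm_alt s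
instance (s : String) (out : String) : Decidable (Spec_drm s out) := by unfold Spec_drm; infer_instance

-- ===== CLAIM (what is proved, stated in full; the proofs are below) =====
def Claim_equal_drm : Prop := ∀ (s : String), Dom_drm s → Spec_drm s (drm s)

-- ===== LEMMAS AND PROOFS =====

-- combineA is zipWith
theorem combineA_eq_zipWith (ls rs : List Char) :
    combineA ls rs = List.zipWith (fun l r => rotateChar l ((r.toNat : Int) - 65)) ls rs := by
  induction ls generalizing rs with
  | nil => cases rs <;> rfl
  | cons l ls ih => cases rs with
    | nil => rfl
    | cons r rs => simp [combineA, ih]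

theorem toNat_rotateChar (c : Char) (k : Int) :
    ((rotateChar c k).toNat : Int) = PySem.Int.mod ((c.toNat : Int) - 65 + k) 26 + 65 := by
  have h0 := PySem.Int.mod_nonneg ((c.toNat : Int) - 65 + k) (b := 26) (by omega)
  have h1 := PySem.Int.mod_lt ((c.toNat : Int) - 65 + k) (b := 26) (by omega)
  unfold rotateChar
  rw [Char.toNat_ofNat, if_pos (Or.inl (by omega))]
  omega

theorem rotateChar_rotateChar (l r : Char) (kL kR : Int) :
    rotateChar (rotateChar l kL) (((rotateChar r kR).toNat : Int) - 65) =
      Char.ofNat ((PySem.Int.mod (((l.toNat : Int)) + (r.toNat : Int) - 130 + (kL + kR)) 26 + 65).toNat) := by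
  have e26 : (0:Int) < 26 := by omega
  rw [toNat_rotateChar]
  unfold rotateChar
  have h0 := PySem.Int.mod_nonneg ((l.toNat : Int) - 65 + kL) (b := 26) e26
  have h1 := PySem.Int.mod_lt ((l.toNat : Int) - 65 + kL) (b := 26) e26
  rw [Char.toNat_ofNat, if_pos (Or.inl (by omega))]
  congr 2
  rw [Int.toNat_of_nonneg (by omega)]
  simp only [PySem.Int.mod_eq_emod_of_pos e26]
  omega

theorem foldl_add_sum (cs : List Char) (a : Int) :
    cs.foldl (fun k c => k + ((c.toNat : Int) - 65)) a
      = a + (cs.map (fun c => (c.toNat : Int) - 65)).sum := by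
  induction cs generalizing a with
  | nil => simp
  | cons c cs ih => simp [List.foldl_cons, ih]; ring

theorem sumK (cs : List Char) :
    (cs.map (fun c => (c.toNat : Int) - 65)).sum
      = (cs.take (cs.length / 2)).foldl (fun k c => k + ((c.toNat : Int) - 65)) 0
      + (cs.drop (cs.length / 2)).foldl (fun k c => k + ((c.toNat : Int) - 65)) 0 := by
  rw [foldl_add_sum, foldl_add_sum]
  have h := congrArg (fun l => ((l.map (fun c => (c.toNat : Int) - 65)).sum))
    (List.take_append_drop (cs.length / 2) cs)
  simp only [List.map_append, List.sum_append] at h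
  omega

-- ===== VERDICT (by name: the statement is the Claim_ definition above) =====
theorem drm_spec : Claim_equal_drm := by
  intro s _
  unfold Spec_drm drm drm_alt rotateA
  simp only
  congr 1
  rw [combineA_eq_zipWith, List.zipWith_map]
  set cs := s.toList with hcs
  set m := cs.length / 2 with hm
  have hm' : m ≤ cs.length - m := by omega
  apply List.ext_getElem
  · simp only [List.length_zipWith, List.length_map, List.length_range, List.length_take, List.length_drop]
    omega
  · intro i h1 h2
    have hi : i < m := by simpa using h2
    have hil : i < cs.length := by omega
    have hmi : m + i < cs.length := by omega
    rw [List.getElem_zipWith, List.getElem_map, List.getElem_range,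
      List.getElem_take, List.getElem_drop]
    rw [rotateChar_rotateChar]
    rw [List.getD_eq_getElem _ _ hil, List.getD_eq_getElem _ _ hmi]
    rw [← sumK cs]
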